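-- pv_equiv track=rewrite | github.com/astropradyumna/dwarf_formation | orbit_calculator_preamble.py | find_first_min_max
-- ===== SOURCE A (Python) =====
-- def find_first_min_max(arr):
--     '''
--     This function is used to return the first maximum and minimum for an array.
--     We use this for the subhalo distance from the center. This gives the first pericenter and apocenter
--     '''
--
--     n = len(arr)
--
--     first_min = None
--     first_max = None
--
--     for i in range(1, n - 1):
--         if first_min is not None and first_max is not None:
--             break
--
--         if arr[i] < arr[i - 1] and arr[i] < arr[i + 1] and first_min is None:
--             first_min = arr[i]
--
--         if arr[i] > arr[i - 1] and arr[i] > arr[i + 1] and first_max is None: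
--             first_max = arr[i]
--
--
--
--     if first_min == None or first_max == None:
--         raise ValueError(f"Cannot find first min or max")
--
--     return first_min, first_max
-- ===== SOURCE B (Python) =====
-- def find_first_min_max(arr):
--     n = len(arr)
--     first_min = next((arr[i] for i in range(1, n - 1)
--                       if arr[i] < arr[i - 1] and arr[i] < arr[i + 1]), None)
--     first_max = next((arr[i] for i in range(1, n - 1)
--                       if arr[i] > arr[i - 1] and arr[i] > arr[i + 1]), None)
--     if first_min is None or first_max is None:
--         raise ValueError("Cannot find first min or max")
--     return first_min, first_max
-- ===== Notes on version B (the rewrite author's own statement) =====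
-- stated objective: simpler
-- what changed: Replaces A's single fused stateful loop (two option accumulators and an early break) by two independent first-match scans, one for the first local minimum and one for the first local maximum.
import Mathlib
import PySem

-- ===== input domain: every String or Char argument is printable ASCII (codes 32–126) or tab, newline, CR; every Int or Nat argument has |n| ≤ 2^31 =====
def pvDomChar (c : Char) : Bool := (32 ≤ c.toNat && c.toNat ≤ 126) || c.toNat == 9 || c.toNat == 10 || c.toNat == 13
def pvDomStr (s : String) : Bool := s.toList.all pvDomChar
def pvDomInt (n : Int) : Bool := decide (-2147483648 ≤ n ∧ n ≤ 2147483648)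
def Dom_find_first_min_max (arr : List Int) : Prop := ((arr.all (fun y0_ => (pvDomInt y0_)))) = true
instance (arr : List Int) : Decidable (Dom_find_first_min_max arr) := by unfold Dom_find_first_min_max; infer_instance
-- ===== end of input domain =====

-- B replaces A's single fused stateful loop (two option accumulators + early break)
-- by two independent first-match scans; objective: simpler.

-- ===== PORT A =====
-- arr[i] for the indices used: all indices are in 1..n-2, hence in range, so getD is exact there
def pvAv (arr : List Int) (i : Nat) : Int := arr.getD i 0
-- Python's range(1, n - 1) as a Nat list (empty when n ≤ 2, matching Python)
def pvIdxs (arr : List Int) : List Nat := List.range' 1 (arr.length - 2)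

-- the for-loop of A: state (first_min, first_max), early break when both are set
def ffmmLoopA (arr : List Int) : List Nat → Option Int × Option Int → Option Int × Option Int
  | [], st => st
  | i :: rest, (fmin, fmax) =>
    if fmin.isSome && fmax.isSome then (fmin, fmax)
    else
      let fmin' := if pvAv arr i < pvAv arr (i - 1) && pvAv arr i < pvAv arr (i + 1) && fmin.isNone
                   then some (pvAv arr i) else fmin
      let fmax' := if pvAv arr i > pvAv arr (i - 1) && pvAv arr i > pvAv arr (i + 1) && fmax.isNone
                   then some (pvAv arr i) else fmax
      ffmmLoopA arr rest (fmin', fmax')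

def find_first_min_max (arr : List Int) : Int × Int :=
  match ffmmLoopA arr (pvIdxs arr) (none, none) with
  | (some m, some M) => (m, M)
  | _ => (0, 0)  -- Python raises ValueError here; excluded by Pre_

-- ===== PORT B =====
-- next((arr[i] for i in range(1, n-1) if arr[i] < arr[i-1] and arr[i] < arr[i+1]), None)
-- range(1, n-1) and arr[i] written inline (indices used are always in range, so getD is exact)
def ffmmFirstMin (arr : List Int) : Option Int :=
  ((List.range' 1 (arr.length - 2)).find? (fun i =>
      decide (arr.getD i 0 < arr.getD (i - 1) 0) && decide (arr.getD i 0 < arr.getD (i + 1) 0))).map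
    (fun i => arr.getD i 0)

def ffmmFirstMax (arr : List Int) : Option Int :=
  ((List.range' 1 (arr.length - 2)).find? (fun i =>
      decide (arr.getD i 0 > arr.getD (i - 1) 0) && decide (arr.getD i 0 > arr.getD (i + 1) 0))).map
    (fun i => arr.getD i 0)

def find_first_min_max_alt (arr : List Int) : Int × Int :=
  match ffmmFirstMin arr with
  | none => (0, 0)  -- Python raises ValueError here; excluded by Pre_
  | some m =>
    match ffmmFirstMax arr with
    | none => (0, 0)  -- Python raises ValueError here; excluded by Pre_
    | some M => (m, M)

-- ===== PRECONDITION & SPEC =====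
-- Pre_: exactly the inputs on which A returns (a strict local minimum and a strict
-- local maximum both exist at an interior index); elsewhere A raises ValueError.
def Pre_find_first_min_max (arr : List Int) : Prop :=
  (∃ i ∈ List.range arr.length, 1 ≤ i ∧ i + 1 < arr.length ∧
      arr.getD i 0 < arr.getD (i - 1) 0 ∧ arr.getD i 0 < arr.getD (i + 1) 0) ∧
  (∃ i ∈ List.range arr.length, 1 ≤ i ∧ i + 1 < arr.length ∧
      arr.getD i 0 > arr.getD (i - 1) 0 ∧ arr.getD i 0 > arr.getD (i + 1) 0)
instance (arr : List Int) : Decidable (Pre_find_first_min_max arr) := by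
  unfold Pre_find_first_min_max; infer_instance
def pvWitness_find_first_min_max : List Int := ([3, 1, 2, 5, 0] : List Int)

def Spec_find_first_min_max (arr : List Int) (out : Int × Int) : Prop := out = find_first_min_max_alt arr
instance (arr : List Int) (out : Int × Int) : Decidable (Spec_find_first_min_max arr out) := by unfold Spec_find_first_min_max; infer_instance

-- ===== CLAIM (what is proved, stated in full; the proofs are below) =====
def Claim_equal_find_first_min_max : Prop := ∀ (arr : List Int), Dom_find_first_min_max arr → Pre_find_first_min_max arr → Spec_find_first_min_max arr (find_first_min_max arr)

-- ===== LEMMAS AND PROOFS =====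

-- A's interleaved loop computes, componentwise, "the accumulator if already set,
-- otherwise the first match on the remaining indices" — i.e. the two scans of B.
theorem ffmmLoopA_eq (arr : List Int) (l : List Nat) (fmin fmax : Option Int) :
    ffmmLoopA arr l (fmin, fmax) =
      (fmin.orElse (fun _ => ((l.find? (fun i =>
          decide (pvAv arr i < pvAv arr (i - 1)) && decide (pvAv arr i < pvAv arr (i + 1)))).map
          (pvAv arr))),
       fmax.orElse (fun _ => ((l.find? (fun i =>
          decide (pvAv arr i > pvAv arr (i - 1)) && decide (pvAv arr i > pvAv arr (i + 1)))).map
          (pvAv arr)))) := by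
  induction l generalizing fmin fmax with
  | nil => cases fmin <;> cases fmax <;> simp [ffmmLoopA, Option.orElse]
  | cons i rest ih =>
    cases hp : (decide (pvAv arr i < pvAv arr (i - 1)) && decide (pvAv arr i < pvAv arr (i + 1))) <;>
    cases hq : (decide (pvAv arr i > pvAv arr (i - 1)) && decide (pvAv arr i > pvAv arr (i + 1))) <;>
    cases fmin <;> cases fmax <;>
    simp [ffmmLoopA, List.find?, hp, hq, ih, Option.orElse]

-- ===== VERDICT (by name: the statement is the Claim_ definition above) =====
theorem find_first_min_max_spec : Claim_equal_find_first_min_max := by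
  intro arr _ _
  have h : ffmmLoopA arr (pvIdxs arr) (none, none) = (ffmmFirstMin arr, ffmmFirstMax arr) := by
    rw [ffmmLoopA_eq]; simp [ffmmFirstMin, ffmmFirstMax, show pvAv arr = fun i => arr.getD i 0 from rfl, pvIdxs, Option.orElse]
  unfold Spec_find_first_min_max find_first_min_max find_first_min_max_alt
  rw [h]
  cases ffmmFirstMin arr <;> cases ffmmFirstMax arr <;> rfl
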